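-- pv_equiv track=rewrite | github.com/qezt/pinyin-tools | reduce_py.py | gen_occurance
-- ===== SOURCE A (Python) =====
-- def gen_occurance(word_pys):
--     counts = {}
--     for word, pys in word_pys.items():
--         for ch, py in zip(word, pys):
--             if ch in counts:
--                 if py in counts[ch]:
--                     counts[ch][py] += 1
--                 else:
--                     counts[ch][py] = 1
--             else:
--                 counts[ch] = {py: 1}
--     return counts
-- ===== SOURCE B (Python) =====
-- def gen_occurance(word_pys):
--     pairs = [(ch, py) for word, pys in word_pys.items() for ch, py in zip(word, pys)]
--     cnt = {}
--     for p in pairs: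
--         cnt[p] = cnt.get(p, 0) + 1
--     firsts = list(dict.fromkeys(ch for ch, _ in pairs))
--     return {ch: {py: n for (c, py), n in cnt.items() if c == ch} for ch in firsts}
-- ===== Notes on version B (the rewrite author's own statement) =====
-- stated objective: alternative
-- what changed: A accumulates a nested dict in one pass with per-pair branch logic; B first flattens all (char, pinyin) pairs, builds one flat frequency table over pairs, and then regroups that table into the nested result in a separate pass.
import Mathlib
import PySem

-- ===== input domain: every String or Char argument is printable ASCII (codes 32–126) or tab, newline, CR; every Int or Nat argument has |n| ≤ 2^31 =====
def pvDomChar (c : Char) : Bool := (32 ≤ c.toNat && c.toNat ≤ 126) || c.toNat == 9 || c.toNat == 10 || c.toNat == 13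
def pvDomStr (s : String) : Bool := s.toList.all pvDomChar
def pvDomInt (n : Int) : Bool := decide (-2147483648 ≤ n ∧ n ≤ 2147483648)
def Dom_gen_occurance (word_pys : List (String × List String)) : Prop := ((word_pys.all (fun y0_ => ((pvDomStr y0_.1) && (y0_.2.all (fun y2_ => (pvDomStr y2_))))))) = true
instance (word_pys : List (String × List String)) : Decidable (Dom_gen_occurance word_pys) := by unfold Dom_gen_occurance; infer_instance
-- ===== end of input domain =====

-- B replaces A's incremental nested-dict accumulation by a count-then-regroup decomposition
-- (flat pair-frequency table first, nested dict built from it afterwards); objective: alternative.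

-- ===== PORT A =====
def gen_occurance (word_pys : List (String × List String)) : List (String × List (String × Int)) :=
  let counts : PySem.Dict String (PySem.Dict String Int) :=
    (PySem.Dict.ofList word_pys).items.foldl (fun counts q =>
      (q.1.toList.zip q.2).foldl (fun counts p =>
        let ch := String.singleton p.1
        let py := p.2
        if counts.contains ch then
          let inner := counts.getD ch PySem.Dict.empty
          if inner.contains py then
            counts.insert ch (inner.insert py (inner.getD py 0 + 1))
          else
            counts.insert ch (inner.insert py 1)
        else
          counts.insert ch (PySem.Dict.empty.insert py 1)) counts) PySem.Dict.empty
  counts.items.map (fun r => (r.1, r.2.items))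

-- ===== PORT B =====
def gen_occurance_alt (word_pys : List (String × List String)) : List (String × List (String × Int)) :=
  let pairs : List (String × String) :=
    (PySem.Dict.ofList word_pys).items.flatMap (fun q =>
      (q.1.toList.zip q.2).map (fun p => (String.singleton p.1, p.2)))
  let cnt : PySem.Dict (String × String) Int :=
    pairs.foldl (fun d p => d.insert p (d.getD p 0 + 1)) PySem.Dict.empty
  let firsts : List String := PySem.List.dedup (pairs.map (fun p => p.1))
  let res : PySem.Dict String (PySem.Dict String Int) :=
    PySem.Dict.ofList (firsts.map (fun ch =>
      (ch, PySem.Dict.ofList ((cnt.items.filter (fun it => it.1.1 == ch)).map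
              (fun it => (it.1.2, it.2))))))
  res.items.map (fun r => (r.1, r.2.items))

-- ===== PRECONDITION & SPEC =====
def Spec_gen_occurance (word_pys : List (String × List String)) (out : List (String × List (String × Int))) : Prop := out = gen_occurance_alt word_pys
instance (word_pys : List (String × List String)) (out : List (String × List (String × Int))) : Decidable (Spec_gen_occurance word_pys out) := by unfold Spec_gen_occurance; infer_instance

-- ===== CLAIM (what is proved, stated in full; the proofs are below) =====
def Claim_equal_gen_occurance : Prop := ∀ (word_pys : List (String × List String)), Dom_gen_occurance word_pys → Spec_gen_occurance word_pys (gen_occurance word_pys)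

-- ===== LEMMAS AND PROOFS =====

-- A's loop body, on the flattened (1-char-string, pinyin) pairs.
def pvStepA (counts : PySem.Dict String (PySem.Dict String Int)) (p : String × String) :
    PySem.Dict String (PySem.Dict String Int) :=
  if counts.contains p.1 then
    let inner := counts.getD p.1 PySem.Dict.empty
    if inner.contains p.2 then
      counts.insert p.1 (inner.insert p.2 (inner.getD p.2 0 + 1))
    else
      counts.insert p.1 (inner.insert p.2 1)
  else
    counts.insert p.1 (PySem.Dict.empty.insert p.2 1)

-- Closed form for A's accumulated nested dict, per flattened pair list.
def pvInner (L : List (String × String)) (ch : String) : List (String × Int) :=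
  ((PySem.List.dedup L).filter (fun q => q.1 == ch)).map (fun q => (q.2, (L.count q : Int)))

def pvModel (L : List (String × String)) : List (String × PySem.Dict String Int) :=
  (PySem.List.dedup (L.map (fun p => p.1))).map (fun ch => (ch, PySem.Dict.mk (pvInner L ch)))

theorem pv_dedup_snoc {α : Type} [BEq α] [LawfulBEq α] (xs : List α) (x : α) :
    PySem.List.dedup (xs ++ [x]) =
      if x ∈ xs then PySem.List.dedup xs else PySem.List.dedup xs ++ [x] := by
  have h : ∀ ys : List α, PySem.List.dedup ys = PySem.Set.ofList ys :=
    fun ys => PySem.List.dedup_eq_ofList ys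
  rw [h, h, PySem.Set.ofList_eq_foldl, PySem.Set.ofList_eq_foldl, List.foldl_append]
  simp only [List.foldl_cons, List.foldl_nil]
  rw [PySem.Set.add_eq_ite]
  have hm : x ∈ xs.foldl PySem.Set.add [] ↔ x ∈ xs := by
    rw [← PySem.Set.ofList_eq_foldl]; exact PySem.Set.mem_ofList xs x
  split_ifs with h1 h2 h2 <;> first | rfl | (exfalso; tauto)

-- q ∈ dedup-filter characterization of a pair's presence
theorem pv_mem_inner_keys (L : List (String × String)) (p : String × String) :
    p.2 ∈ (pvInner L p.1).map (fun r => r.1) ↔ p ∈ L := by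
  unfold pvInner
  rw [List.map_map]
  constructor
  · intro h
    obtain ⟨q, hqf, hq2⟩ := List.mem_map.mp h
    have h1 := List.of_mem_filter hqf
    have h1' : q.1 = p.1 := by simpa using h1
    have hq : q = p := Prod.ext h1' hq2
    have := List.mem_of_mem_filter hqf
    rw [hq] at this
    exact (PySem.List.mem_dedup L p).mp this
  · intro h
    refine List.mem_map.mpr ⟨p, List.mem_filter.mpr ⟨(PySem.List.mem_dedup L p).mpr h, by simp⟩, rfl⟩

theorem pv_inner_nodup (L : List (String × String)) (ch : String) :
    ((pvInner L ch).map (fun r => r.1)).Nodup := by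
  unfold pvInner
  rw [List.map_map]
  apply List.Nodup.map_on
  · intro x hx y hy hxy
    have hx1 : x.1 = ch := by simpa using List.of_mem_filter hx
    have hy1 : y.1 = ch := by simpa using List.of_mem_filter hy
    exact Prod.ext (hx1.trans hy1.symm) hxy
  · exact (PySem.List.nodup_dedup L).filter _

theorem pv_inner_snoc_ne (L : List (String × String)) (p : String × String) (ch : String)
    (h : p.1 ≠ ch) : pvInner (L ++ [p]) ch = pvInner L ch := by
  unfold pvInner
  rw [pv_dedup_snoc]
  have hfilt : ∀ (M : List (String × String)), (M ++ [p]).filter (fun q => q.1 == ch)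
      = M.filter (fun q => q.1 == ch) := by
    intro M; rw [List.filter_append]
    simp [h]
  split_ifs with hp
  · apply List.map_congr_left
    intro q hq
    have hqp : q ≠ p := by
      intro he; subst he
      exact h (by simpa using List.of_mem_filter hq)
    simp [List.count_append, Ne.symm hqp]
  · rw [hfilt]
    apply List.map_congr_left
    intro q hq
    have hqp : q ≠ p := by
      intro he; subst he
      exact h (by simpa using List.of_mem_filter hq)
    simp [List.count_append, Ne.symm hqp]

theorem pv_foldA_items (L : List (String × String)) :
    (L.foldl pvStepA PySem.Dict.empty).items = pvModel L := by
  induction L using List.reverseRecOn with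
  | nil => rfl
  | append_singleton L p ih =>
    rw [List.foldl_append, List.foldl_cons, List.foldl_nil]
    set d := L.foldl pvStepA PySem.Dict.empty with hd
    have hkeys : d.keys = PySem.List.dedup (L.map (fun q => q.1)) := by
      show d.items.map (fun q => q.1) = _
      rw [ih]; unfold pvModel; rw [List.map_map]; apply List.map_id
    have hknd : d.keys.Nodup := by rw [hkeys]; exact PySem.List.nodup_dedup _
    have hcont : d.contains p.1 = decide (p.1 ∈ L.map (fun q => q.1)) := by
      rw [PySem.Dict.contains_eq_decide_mem_keys, hkeys]
      simp only [decide_eq_decide]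
      exact PySem.List.mem_dedup _ _
    by_cases hc : p.1 ∈ L.map (fun q => q.1)
    · -- char already present
      have hcT : d.contains p.1 = true := by rw [hcont]; simpa using hc
      have hmem : (p.1, PySem.Dict.mk (pvInner L p.1)) ∈ d.items := by
        rw [ih]; unfold pvModel
        exact List.mem_map.mpr ⟨p.1, (PySem.List.mem_dedup _ _).mpr hc, rfl⟩
      have hinner : d.getD p.1 PySem.Dict.empty = PySem.Dict.mk (pvInner L p.1) :=
        PySem.Dict.getD_of_mem_items d hmem hknd _
      have hicont : (PySem.Dict.mk (pvInner L p.1)).contains p.2 = decide (p ∈ L) := by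
        rw [PySem.Dict.contains_eq_decide_mem_keys]
        rw [PySem.Dict.keys_mk]
        simp only [pv_mem_inner_keys]
      have hmodel : pvModel (L ++ [p]) = (PySem.List.dedup (L.map (fun q => q.1))).map
          (fun ch => (ch, PySem.Dict.mk (pvInner (L ++ [p]) ch))) := by
        unfold pvModel
        rw [List.map_append]
        simp only [List.map_cons, List.map_nil]
        rw [pv_dedup_snoc, if_pos hc]
      by_cases hp : p ∈ L
      · -- pair already present: bump in place
        have hipT : (PySem.Dict.mk (pvInner L p.1)).contains p.2 = true := by
          rw [hicont]; simpa using hp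
        have hpd : p ∈ PySem.List.dedup L := (PySem.List.mem_dedup _ _).mpr hp
        have hpf : p ∈ (PySem.List.dedup L).filter (fun q => q.1 == p.1) :=
          List.mem_filter.mpr ⟨hpd, by simp⟩
        have hgd : (PySem.Dict.mk (pvInner L p.1)).getD p.2 0 = (L.count p : Int) := by
          apply PySem.Dict.getD_of_mem_items
          · unfold pvInner; exact List.mem_map.mpr ⟨p, hpf, rfl⟩
          · rw [PySem.Dict.keys_mk]; exact pv_inner_nodup L p.1
        simp only [pvStepA, hcT, if_true, hinner, hipT, hgd]
        rw [PySem.Dict.items_insert_of_contains _ _ hcT, ih, hmodel]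
        unfold pvModel
        rw [List.map_map]
        apply List.map_congr_left
        intro ch hch
        by_cases hchp : ch = p.1
        · subst hchp
          simp only [Function.comp, beq_self_eq_true, if_true]
          refine congrArg (Prod.mk p.1) (PySem.Dict.ext ?_)
          rw [PySem.Dict.items_insert_of_contains _ _ hipT]
          show (pvInner L p.1).map _ = pvInner (L ++ [p]) p.1
          unfold pvInner
          rw [pv_dedup_snoc, if_pos hp, List.map_map]
          apply List.map_congr_left
          intro q hq
          have hq1 : q.1 = p.1 := by simpa using List.of_mem_filter hq
          by_cases hq2 : q.2 = p.2
          · have hqp : q = p := Prod.ext (by rw [hq1]) hq2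
            subst hqp
            simp [List.count_append]
          · have hqp : q ≠ p := fun he => hq2 (congrArg Prod.snd he)
            simp only [Function.comp]
            rw [if_neg (by simpa using hq2)]
            simp [List.count_append, Ne.symm hqp]
        · simp only [Function.comp]
          rw [if_neg (by simpa using hchp)]
          rw [pv_inner_snoc_ne L p ch (fun h => hchp h.symm)]
      · -- char present, pair new: append to inner dict
        have hipF : (PySem.Dict.mk (pvInner L p.1)).contains p.2 = false := by
          rw [hicont]; simpa using hp
        simp only [pvStepA, hcT, if_true, hinner, hipF, Bool.false_eq_true, if_false]
        rw [PySem.Dict.items_insert_of_contains _ _ hcT, ih, hmodel]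
        unfold pvModel
        rw [List.map_map]
        apply List.map_congr_left
        intro ch hch
        by_cases hchp : ch = p.1
        · subst hchp
          simp only [Function.comp, beq_self_eq_true, if_true]
          refine congrArg (Prod.mk p.1) (PySem.Dict.ext ?_)
          rw [PySem.Dict.items_insert_of_not_contains _ _ hipF]
          show pvInner L p.1 ++ [(p.2, 1)] = pvInner (L ++ [p]) p.1
          unfold pvInner
          rw [pv_dedup_snoc, if_neg hp, List.filter_append]
          have : [p].filter (fun q => q.1 == p.1) = [p] := by simp
          rw [this, List.map_append]
          congr 1
          · apply List.map_congr_left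
            intro q hq
            have hqp : q ≠ p := by
              intro he; subst he
              exact hp ((PySem.List.mem_dedup _ _).mp (List.mem_of_mem_filter hq))
            simp [List.count_append, Ne.symm hqp]
          · simp [List.count_append, List.count_eq_zero.mpr hp]
        · simp only [Function.comp]
          rw [if_neg (by simpa using hchp)]
          rw [pv_inner_snoc_ne L p ch (fun h => hchp h.symm)]
    · -- new char: append to outer dict
      have hcF : d.contains p.1 = false := by rw [hcont]; simpa using hc
      simp only [pvStepA, hcF, Bool.false_eq_true, if_false]
      rw [PySem.Dict.items_insert_of_not_contains _ _ hcF, ih]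
      unfold pvModel
      rw [List.map_append]
      simp only [List.map_cons, List.map_nil]
      rw [pv_dedup_snoc, if_neg hc, List.map_append]
      congr 1
      · apply List.map_congr_left
        intro ch hch
        have hchp : p.1 ≠ ch := by
          intro he
          exact hc (he ▸ (PySem.List.mem_dedup _ _).mp hch)
        rw [pv_inner_snoc_ne L p ch hchp]
      · simp only [List.map_cons, List.map_nil]
        refine congrArg (fun z => [(p.1, z)]) (PySem.Dict.ext ?_)
        rw [PySem.Dict.items_insert_of_not_contains _ _ (by simp)]
        show [(p.2, (1 : Int))] = pvInner (L ++ [p]) p.1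
        have hp : p ∉ L := fun h => hc (List.mem_map.mpr ⟨p, h, rfl⟩)
        unfold pvInner
        rw [pv_dedup_snoc, if_neg hp, List.filter_append]
        have h1 : (PySem.List.dedup L).filter (fun q => q.1 == p.1) = [] := by
          rw [List.filter_eq_nil_iff]
          intro q hq hbe
          exact hc (List.mem_map.mpr ⟨q, (PySem.List.mem_dedup _ _).mp hq, by simpa using hbe⟩)
        rw [h1]
        simp [List.count_append, List.count_eq_zero.mpr hp]

theorem pv_fold_eq (wp : List (String × List String))
    (init : PySem.Dict String (PySem.Dict String Int)) :
    wp.foldl (fun counts q =>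
      (q.1.toList.zip q.2).foldl (fun counts p =>
        let ch := String.singleton p.1
        let py := p.2
        if counts.contains ch then
          let inner := counts.getD ch PySem.Dict.empty
          if inner.contains py then
            counts.insert ch (inner.insert py (inner.getD py 0 + 1))
          else
            counts.insert ch (inner.insert py 1)
        else
          counts.insert ch (PySem.Dict.empty.insert py 1)) counts) init
    = (wp.flatMap (fun q => (q.1.toList.zip q.2).map (fun p => (String.singleton p.1, p.2)))).foldl
        pvStepA init := by
  rw [List.foldl_flatMap]
  simp only [List.foldl_map]
  rfl

theorem pv_items_ofList {κ ν : Type} [BEq κ] [LawfulBEq κ] (xs : List (κ × ν))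
    (h : (xs.map (fun r => r.1)).Nodup) : (PySem.Dict.ofList xs).items = xs := by
  have := PySem.Dict.items_foldl_insert_fresh xs (fun r => r.1) (fun r => r.2)
    PySem.Dict.empty (fun a _ => by simp) h
  simpa using this

theorem gen_occurance_eq (word_pys : List (String × List String)) :
    gen_occurance word_pys = gen_occurance_alt word_pys := by
  unfold gen_occurance gen_occurance_alt
  rw [pv_fold_eq]
  set pairs : List (String × String) :=
    (PySem.Dict.ofList word_pys).items.flatMap
      (fun q => (q.1.toList.zip q.2).map (fun p => (String.singleton p.1, p.2))) with hpairs
  dsimp only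
  rw [pv_foldA_items pairs]
  rw [PySem.Dict.foldl_insert_getD_add_one_eq_counter]
  have hBinner : ∀ ch : String,
      ((PySem.Dict.counter pairs).items.filter (fun it => it.1.1 == ch)).map
        (fun it => (it.1.2, it.2)) = pvInner pairs ch := by
    intro ch
    rw [PySem.Dict.items_counter, List.filter_map, List.map_map]
    unfold pvInner
    rw [PySem.List.dedup_eq_ofList]
    rfl
  have hres : ∀ xs : List (String × PySem.Dict String Int),
      (xs.map (fun r => r.1)).Nodup → (PySem.Dict.ofList xs).items = xs :=
    fun xs h => pv_items_ofList xs h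
  rw [hres _ ?_]
  · unfold pvModel
    rw [List.map_map, List.map_map]
    apply List.map_congr_left
    intro ch hch
    simp only [Function.comp]
    refine congrArg (Prod.mk ch) ?_
    show (PySem.Dict.mk (pvInner pairs ch)).items = _
    rw [pv_items_ofList _ (by rw [hBinner ch]; exact pv_inner_nodup pairs ch)]
    rw [hBinner ch]
  · rw [List.map_map]
    have : ((fun r : String × PySem.Dict String Int => r.1) ∘
        (fun ch => (ch, PySem.Dict.ofList (((PySem.Dict.counter pairs).items.filter
          (fun it => it.1.1 == ch)).map (fun it => (it.1.2, it.2)))))) = fun ch => ch := rfl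
    rw [this]
    simp

-- ===== VERDICT (by name: the statement is the Claim_ definition above) =====
theorem gen_occurance_spec : Claim_equal_gen_occurance := by
  intro word_pys _
  unfold Spec_gen_occurance
  exact gen_occurance_eq word_pys
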